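-- pv_equiv track=rewrite | github.com/rh-ai-quickstart/spending-transaction-monitor | packages/api/src/services/recommendations/ml/feature_engineering.py | extract_alert_types_from_rules
-- ===== SOURCE A (Python) =====
-- from typing import Any
--
-- def extract_alert_types_from_rules(alert_rules: list[dict[str, Any]]) -> dict[str, int]:
--     """
--     Extract alert types from user's active alert rules.
--     Maps natural language queries to standardized alert types.
--
--     Args:
--         alert_rules: List of alert rule dictionaries
--
--     Returns:
--         Dictionary mapping alert type names to binary values (0 or 1)
--     """
--     alert_types = {
--         'alert_high_spender': 0,
--         'alert_high_tx_volume': 0,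
--         'alert_high_merchant_diversity': 0,
--         'alert_near_credit_limit': 0,
--         'alert_large_transaction': 0,
--         'alert_new_merchant': 0,
--         'alert_location_based': 0,
--         'alert_subscription_monitoring': 0,
--     }
--
--     # Keywords to identify alert types
--     keyword_mapping = {
--         'alert_high_spender': ['spending', 'spent', 'spend over', 'total spend'],
--         'alert_high_tx_volume': [
--             'transaction count',
--             'number of transactions',
--             'frequent',
--         ],
--         'alert_high_merchant_diversity': ['different merchant', 'variety', 'diverse'],
--         'alert_near_credit_limit': ['credit limit', 'balance', 'utilization'],
--         'alert_large_transaction': ['large', 'big purchase', 'amount over', 'exceeds'],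
--         'alert_new_merchant': ['new merchant', 'unfamiliar', 'first time'],
--         'alert_location_based': ['location', 'out of state', 'international', 'travel'],
--         'alert_subscription_monitoring': [
--             'subscription',
--             'recurring',
--             'monthly charge',
--         ],
--     }
--
--     for rule in alert_rules:
--         query = rule.get('natural_language_query', '').lower()
--
--         for alert_type, keywords in keyword_mapping.items():
--             if any(keyword in query for keyword in keywords):
--                 alert_types[alert_type] = 1
--
--     return alert_types
-- ===== SOURCE B (Python) =====
-- def extract_alert_types_from_rules(alert_rules):
--     """Swap the loop nesting: compute each alert-type flag independently by an
--     early-exit scan over the rules, building the result dict directly (no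
--     zero-init + mutation pass)."""
--
--     def flag(keywords):
--         for rule in alert_rules:
--             query = rule.get('natural_language_query', '').lower()
--             if any(kw in query for kw in keywords):
--                 return 1
--         return 0
--
--     return {
--         'alert_high_spender': flag(['spending', 'spent', 'spend over', 'total spend']),
--         'alert_high_tx_volume': flag(['transaction count', 'number of transactions', 'frequent']),
--         'alert_high_merchant_diversity': flag(['different merchant', 'variety', 'diverse']),
--         'alert_near_credit_limit': flag(['credit limit', 'balance', 'utilization']),
--         'alert_large_transaction': flag(['large', 'big purchase', 'amount over', 'exceeds']),
--         'alert_new_merchant': flag(['new merchant', 'unfamiliar', 'first time']),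
--         'alert_location_based': flag(['location', 'out of state', 'international', 'travel']),
--         'alert_subscription_monitoring': flag(['subscription', 'recurring', 'monthly charge']),
--     }
-- ===== Notes on version B (the rewrite author's own statement) =====
-- stated objective: alternative
-- what changed: A zero-initializes a dict and, per rule, rescans every alert type's keywords and mutates the dict; B swaps the loop nesting: each alert-type flag is computed independently by an early-exit scan over the rules, and the result dict is built directly with no initial-zeros-plus-mutation pass.
import Mathlib
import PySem

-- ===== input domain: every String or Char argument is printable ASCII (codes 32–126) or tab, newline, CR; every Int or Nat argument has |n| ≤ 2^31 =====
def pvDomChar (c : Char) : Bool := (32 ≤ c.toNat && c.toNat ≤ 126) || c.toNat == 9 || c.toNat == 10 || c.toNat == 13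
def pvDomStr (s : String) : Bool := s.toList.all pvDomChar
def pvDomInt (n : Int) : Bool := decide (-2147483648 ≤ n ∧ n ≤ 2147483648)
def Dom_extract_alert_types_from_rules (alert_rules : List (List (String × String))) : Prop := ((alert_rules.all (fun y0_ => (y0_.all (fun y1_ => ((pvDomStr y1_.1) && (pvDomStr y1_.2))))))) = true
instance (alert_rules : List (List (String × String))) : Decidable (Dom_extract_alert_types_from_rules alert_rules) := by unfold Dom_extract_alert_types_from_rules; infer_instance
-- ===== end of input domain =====

-- B swaps A's loop nesting: each alert-type flag is computed by an independent early-exit scan over the rules and the result list is built directly, instead of A's zero-init dict mutated per rule (alternative decomposition; return values proved equal).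


-- ===== PORT A =====
-- the keyword_mapping literal of Source A
def pvKwMap : List (String × List String) :=
  [("alert_high_spender", ["spending", "spent", "spend over", "total spend"]),
   ("alert_high_tx_volume", ["transaction count", "number of transactions", "frequent"]),
   ("alert_high_merchant_diversity", ["different merchant", "variety", "diverse"]),
   ("alert_near_credit_limit", ["credit limit", "balance", "utilization"]),
   ("alert_large_transaction", ["large", "big purchase", "amount over", "exceeds"]),
   ("alert_new_merchant", ["new merchant", "unfamiliar", "first time"]),
   ("alert_location_based", ["location", "out of state", "international", "travel"]),
   ("alert_subscription_monitoring", ["subscription", "recurring", "monthly charge"])]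

-- A's zero-initialized alert_types dict
def pvInitA : PySem.Dict String Int :=
  ⟨[("alert_high_spender", 0), ("alert_high_tx_volume", 0), ("alert_high_merchant_diversity", 0),
    ("alert_near_credit_limit", 0), ("alert_large_transaction", 0), ("alert_new_merchant", 0),
    ("alert_location_based", 0), ("alert_subscription_monitoring", 0)]⟩

-- query = rule.get('natural_language_query', '').lower()  (A's line)
def pvRuleQuery (rule : List (String × String)) : String :=
  PySem.Str.lower (PySem.Dict.getD ⟨rule⟩ "natural_language_query" "")

-- body of A's outer 'for rule in alert_rules' loop
def pvStepA (d : PySem.Dict String Int) (rule : List (String × String)) : PySem.Dict String Int :=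
  let query := pvRuleQuery rule
  pvKwMap.foldl
    (fun d' p => if p.2.any (fun kw => PySem.Str.isIn kw query) then d'.insert p.1 1 else d') d

def extract_alert_types_from_rules (alert_rules : List (List (String × String))) : List (String × Int) :=
  (alert_rules.foldl pvStepA pvInitA).items

-- ===== PORT B =====
-- B's 'flag' helper: scan the rules, return 1 at the first rule whose lowered query
-- contains one of the keywords, 0 if the scan runs out
def pvFlag (keywords : List String) : List (List (String × String)) → Int
  | [] => 0
  | rule :: rest =>
    let query := PySem.Str.lower (PySem.Dict.getD ⟨rule⟩ "natural_language_query" "")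
    if keywords.any (fun kw => PySem.Str.isIn kw query) then 1 else pvFlag keywords rest

def extract_alert_types_from_rules_alt (alert_rules : List (List (String × String))) : List (String × Int) :=
  [("alert_high_spender", pvFlag ["spending", "spent", "spend over", "total spend"] alert_rules),
   ("alert_high_tx_volume", pvFlag ["transaction count", "number of transactions", "frequent"] alert_rules),
   ("alert_high_merchant_diversity", pvFlag ["different merchant", "variety", "diverse"] alert_rules),
   ("alert_near_credit_limit", pvFlag ["credit limit", "balance", "utilization"] alert_rules),
   ("alert_large_transaction", pvFlag ["large", "big purchase", "amount over", "exceeds"] alert_rules),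
   ("alert_new_merchant", pvFlag ["new merchant", "unfamiliar", "first time"] alert_rules),
   ("alert_location_based", pvFlag ["location", "out of state", "international", "travel"] alert_rules),
   ("alert_subscription_monitoring", pvFlag ["subscription", "recurring", "monthly charge"] alert_rules)]

-- ===== PRECONDITION & SPEC =====
def Spec_extract_alert_types_from_rules (alert_rules : List (List (String × String))) (out : List (String × Int)) : Prop := out = extract_alert_types_from_rules_alt alert_rules
instance (alert_rules : List (List (String × String))) (out : List (String × Int)) : Decidable (Spec_extract_alert_types_from_rules alert_rules out) := by unfold Spec_extract_alert_types_from_rules; infer_instance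

-- ===== CLAIM (what is proved, stated in full; the proofs are below) =====
def Claim_equal_extract_alert_types_from_rules : Prop := ∀ (alert_rules : List (List (String × String))), Dom_extract_alert_types_from_rules alert_rules → Spec_extract_alert_types_from_rules alert_rules (extract_alert_types_from_rules alert_rules)

-- ===== LEMMAS AND PROOFS =====

-- does any keyword of kws occur in q?
def pvMatch (kws : List String) (q : String) : Bool := kws.any (fun kw => PySem.Str.isIn kw q)

-- B's early-exit scan computes 'any rule matches'
theorem pv_flag_eq_any (kws : List String) (rules : List (List (String × String))) :
    pvFlag kws rules = (if rules.any (fun r => pvMatch kws (pvRuleQuery r)) then (1 : Int) else 0) := by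
  induction rules with
  | nil => rfl
  | cons r rs ih =>
    show (if pvMatch kws (pvRuleQuery r) then (1 : Int) else pvFlag kws rs) = _
    rw [List.any_cons, ih]
    cases pvMatch kws (pvRuleQuery r) <;> simp

-- the canonical shape of A's dict: the eight fixed keys in order
def pvCanon (v1 v2 v3 v4 v5 v6 v7 v8 : Int) : PySem.Dict String Int :=
  ⟨[("alert_high_spender", v1), ("alert_high_tx_volume", v2),
    ("alert_high_merchant_diversity", v3), ("alert_near_credit_limit", v4),
    ("alert_large_transaction", v5), ("alert_new_merchant", v6),
    ("alert_location_based", v7), ("alert_subscription_monitoring", v8)]⟩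

theorem pv_init_eq : pvInitA = pvCanon 0 0 0 0 0 0 0 0 := rfl

-- 1-absorption used when merging one rule's matches into the accumulated flags
theorem pv_if_or (a b : Bool) (v : Int) :
    (if b then (1 : Int) else if a then 1 else v) = (if a || b then 1 else v) := by
  cases a <;> cases b <;> simp

-- one insert-or-skip of A's inner loop, per key
theorem pv_ins1 (c : Bool) (v1 v2 v3 v4 v5 v6 v7 v8 : Int) :
    (if c then (pvCanon v1 v2 v3 v4 v5 v6 v7 v8).insert "alert_high_spender" 1
     else pvCanon v1 v2 v3 v4 v5 v6 v7 v8) =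
    pvCanon (if c then 1 else v1) v2 v3 v4 v5 v6 v7 v8 := by
  cases c <;> simp [pvCanon, PySem.Dict.insert, PySem.Dict.contains]

theorem pv_ins2 (c : Bool) (v1 v2 v3 v4 v5 v6 v7 v8 : Int) :
    (if c then (pvCanon v1 v2 v3 v4 v5 v6 v7 v8).insert "alert_high_tx_volume" 1
     else pvCanon v1 v2 v3 v4 v5 v6 v7 v8) =
    pvCanon v1 (if c then 1 else v2) v3 v4 v5 v6 v7 v8 := by
  cases c <;> simp [pvCanon, PySem.Dict.insert, PySem.Dict.contains]

theorem pv_ins3 (c : Bool) (v1 v2 v3 v4 v5 v6 v7 v8 : Int) :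
    (if c then (pvCanon v1 v2 v3 v4 v5 v6 v7 v8).insert "alert_high_merchant_diversity" 1
     else pvCanon v1 v2 v3 v4 v5 v6 v7 v8) =
    pvCanon v1 v2 (if c then 1 else v3) v4 v5 v6 v7 v8 := by
  cases c <;> simp [pvCanon, PySem.Dict.insert, PySem.Dict.contains]

theorem pv_ins4 (c : Bool) (v1 v2 v3 v4 v5 v6 v7 v8 : Int) :
    (if c then (pvCanon v1 v2 v3 v4 v5 v6 v7 v8).insert "alert_near_credit_limit" 1
     else pvCanon v1 v2 v3 v4 v5 v6 v7 v8) =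
    pvCanon v1 v2 v3 (if c then 1 else v4) v5 v6 v7 v8 := by
  cases c <;> simp [pvCanon, PySem.Dict.insert, PySem.Dict.contains]

theorem pv_ins5 (c : Bool) (v1 v2 v3 v4 v5 v6 v7 v8 : Int) :
    (if c then (pvCanon v1 v2 v3 v4 v5 v6 v7 v8).insert "alert_large_transaction" 1
     else pvCanon v1 v2 v3 v4 v5 v6 v7 v8) =
    pvCanon v1 v2 v3 v4 (if c then 1 else v5) v6 v7 v8 := by
  cases c <;> simp [pvCanon, PySem.Dict.insert, PySem.Dict.contains]

theorem pv_ins6 (c : Bool) (v1 v2 v3 v4 v5 v6 v7 v8 : Int) :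
    (if c then (pvCanon v1 v2 v3 v4 v5 v6 v7 v8).insert "alert_new_merchant" 1
     else pvCanon v1 v2 v3 v4 v5 v6 v7 v8) =
    pvCanon v1 v2 v3 v4 v5 (if c then 1 else v6) v7 v8 := by
  cases c <;> simp [pvCanon, PySem.Dict.insert, PySem.Dict.contains]

theorem pv_ins7 (c : Bool) (v1 v2 v3 v4 v5 v6 v7 v8 : Int) :
    (if c then (pvCanon v1 v2 v3 v4 v5 v6 v7 v8).insert "alert_location_based" 1
     else pvCanon v1 v2 v3 v4 v5 v6 v7 v8) =
    pvCanon v1 v2 v3 v4 v5 v6 (if c then 1 else v7) v8 := by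
  cases c <;> simp [pvCanon, PySem.Dict.insert, PySem.Dict.contains]

theorem pv_ins8 (c : Bool) (v1 v2 v3 v4 v5 v6 v7 v8 : Int) :
    (if c then (pvCanon v1 v2 v3 v4 v5 v6 v7 v8).insert "alert_subscription_monitoring" 1
     else pvCanon v1 v2 v3 v4 v5 v6 v7 v8) =
    pvCanon v1 v2 v3 v4 v5 v6 v7 (if c then 1 else v8) := by
  cases c <;> simp [pvCanon, PySem.Dict.insert, PySem.Dict.contains]

-- one pass of A's outer loop on the canonical dict shape
theorem pv_stepA_canon (rule : List (String × String)) (v1 v2 v3 v4 v5 v6 v7 v8 : Int) :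
    pvStepA (pvCanon v1 v2 v3 v4 v5 v6 v7 v8) rule =
    pvCanon (if pvMatch ["spending", "spent", "spend over", "total spend"] (pvRuleQuery rule) then 1 else v1)
      (if pvMatch ["transaction count", "number of transactions", "frequent"] (pvRuleQuery rule) then 1 else v2)
      (if pvMatch ["different merchant", "variety", "diverse"] (pvRuleQuery rule) then 1 else v3)
      (if pvMatch ["credit limit", "balance", "utilization"] (pvRuleQuery rule) then 1 else v4)
      (if pvMatch ["large", "big purchase", "amount over", "exceeds"] (pvRuleQuery rule) then 1 else v5)
      (if pvMatch ["new merchant", "unfamiliar", "first time"] (pvRuleQuery rule) then 1 else v6)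
      (if pvMatch ["location", "out of state", "international", "travel"] (pvRuleQuery rule) then 1 else v7)
      (if pvMatch ["subscription", "recurring", "monthly charge"] (pvRuleQuery rule) then 1 else v8) := by
  simp only [pvStepA, pvKwMap, pvMatch, List.foldl]
  rw [pv_ins1, pv_ins2, pv_ins3, pv_ins4, pv_ins5, pv_ins6, pv_ins7, pv_ins8]
  rfl

-- A's whole fold on the canonical dict shape
theorem pv_foldA_canon (rules : List (List (String × String))) (v1 v2 v3 v4 v5 v6 v7 v8 : Int) :
    rules.foldl pvStepA (pvCanon v1 v2 v3 v4 v5 v6 v7 v8) =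
    pvCanon (if rules.any (fun r => pvMatch ["spending", "spent", "spend over", "total spend"] (pvRuleQuery r)) then 1 else v1)
      (if rules.any (fun r => pvMatch ["transaction count", "number of transactions", "frequent"] (pvRuleQuery r)) then 1 else v2)
      (if rules.any (fun r => pvMatch ["different merchant", "variety", "diverse"] (pvRuleQuery r)) then 1 else v3)
      (if rules.any (fun r => pvMatch ["credit limit", "balance", "utilization"] (pvRuleQuery r)) then 1 else v4)
      (if rules.any (fun r => pvMatch ["large", "big purchase", "amount over", "exceeds"] (pvRuleQuery r)) then 1 else v5)
      (if rules.any (fun r => pvMatch ["new merchant", "unfamiliar", "first time"] (pvRuleQuery r)) then 1 else v6)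
      (if rules.any (fun r => pvMatch ["location", "out of state", "international", "travel"] (pvRuleQuery r)) then 1 else v7)
      (if rules.any (fun r => pvMatch ["subscription", "recurring", "monthly charge"] (pvRuleQuery r)) then 1 else v8) := by
  induction rules generalizing v1 v2 v3 v4 v5 v6 v7 v8 with
  | nil => simp
  | cons r rs ih =>
    rw [List.foldl_cons, pv_stepA_canon, ih]
    simp only [List.any_cons, pv_if_or]
    rfl

-- ===== VERDICT (by name: the statement is the Claim_ definition above) =====
theorem extract_alert_types_from_rules_spec : Claim_equal_extract_alert_types_from_rules := by
  intro rules _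
  show extract_alert_types_from_rules rules = extract_alert_types_from_rules_alt rules
  rw [extract_alert_types_from_rules, pv_init_eq, pv_foldA_canon]
  simp only [extract_alert_types_from_rules_alt, pv_flag_eq_any, pvCanon]
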